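-- pv_equiv track=rewrite | github.com/dessertlab/OpenStack-multi-tenant-workload | Monitoring Rules/Step 3 - Rules Checking/RPC_rule_finder.py | add_rule
-- ===== SOURCE A (Python) =====
-- def add_rule(rules, pattern, counter, pattern_type, rule_type):
--
-- 	if len(rules) == 0:
--
-- 		rules.append((pattern, counter, pattern_type, rule_type))
-- 		return rules
--
-- 	found = False
--
-- 	for rule in rules:
--
-- 		check = []
-- 		used = []
--
-- 		for line in rule[0]:
--
-- 			used.append(False)
--
-- 		for row in pattern:
--
-- 			check.append(False)
--
-- 		if rule_type == "ORD" and rule[3] == "ORD":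
-- 			if pattern_type == rule[2] and len(pattern) == len(rule[0]):
-- 				for i in range(0, len(pattern)):
-- 					if pattern[i][6] == rule[0][i][6] and pattern[i][7] == rule[0][i][7]:
--
-- 						check[i] = True
--
-- 				check_counter = 0
--
-- 				for item in check:
-- 					if item:
--
-- 						check_counter += 1
--
-- 				if check_counter == len(pattern):
--
-- 					found = True
-- 					break
--
-- 		elif rule_type == "OCC" and rule[3] == "OCC":
-- 			if pattern_type == rule[2] and len(pattern) == len(rule[0]):
--
-- 				i = 0
--
-- 				for row in pattern:
--
-- 					j = 0
--
-- 					for line in rule[0]: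
-- 						if row[6] == line[6] and row[7] == line[7] and not used[j] and not check[i]:
--
-- 							used[j] = True
-- 							check[i] = True
-- 							break
--
--
-- 						j += 1
--
-- 					i += 1
--
-- 				check_counter = 0
--
-- 				for item in check:
-- 					if item:
--
-- 						check_counter += 1
--
-- 				if check_counter == len(pattern):
--
-- 					found = True
-- 					break
--
--
-- 	if not found:
--
-- 		rules.append((pattern, counter, pattern_type, rule_type))
--
-- 	return rules
-- ===== SOURCE B (Python) =====
-- def add_rule(rules, pattern, counter, pattern_type, rule_type):
--
--     pkeys = [tuple(row[6:8]) for row in pattern]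
--
--     found = False
--
--     for rule in rules:
--
--         if rule[3] != rule_type or rule[2] != pattern_type or len(rule[0]) != len(pattern):
--             continue
--
--         rkeys = [tuple(line[6:8]) for line in rule[0]]
--
--         if rule_type == "ORD":
--             if pkeys == rkeys:
--                 found = True
--                 break
--         elif rule_type == "OCC":
--             if all(pkeys.count(k) == rkeys.count(k) for k in pkeys):
--                 found = True
--                 break
--
--     if not found:
--         rules.append((pattern, counter, pattern_type, rule_type))
--
--     return rules
-- ===== Notes on version B (the rewrite author's own statement) =====
-- stated objective: simpler
-- what changed: Replaced A's index-driven check/used boolean-marking loops by comparing the lists of (row[6],row[7]) key tuples directly: plain list equality for ORD and per-key count comparison (multiset equality) for OCC, with the empty-rules early path subsumed by the ordinary not-found append.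
import Mathlib
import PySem

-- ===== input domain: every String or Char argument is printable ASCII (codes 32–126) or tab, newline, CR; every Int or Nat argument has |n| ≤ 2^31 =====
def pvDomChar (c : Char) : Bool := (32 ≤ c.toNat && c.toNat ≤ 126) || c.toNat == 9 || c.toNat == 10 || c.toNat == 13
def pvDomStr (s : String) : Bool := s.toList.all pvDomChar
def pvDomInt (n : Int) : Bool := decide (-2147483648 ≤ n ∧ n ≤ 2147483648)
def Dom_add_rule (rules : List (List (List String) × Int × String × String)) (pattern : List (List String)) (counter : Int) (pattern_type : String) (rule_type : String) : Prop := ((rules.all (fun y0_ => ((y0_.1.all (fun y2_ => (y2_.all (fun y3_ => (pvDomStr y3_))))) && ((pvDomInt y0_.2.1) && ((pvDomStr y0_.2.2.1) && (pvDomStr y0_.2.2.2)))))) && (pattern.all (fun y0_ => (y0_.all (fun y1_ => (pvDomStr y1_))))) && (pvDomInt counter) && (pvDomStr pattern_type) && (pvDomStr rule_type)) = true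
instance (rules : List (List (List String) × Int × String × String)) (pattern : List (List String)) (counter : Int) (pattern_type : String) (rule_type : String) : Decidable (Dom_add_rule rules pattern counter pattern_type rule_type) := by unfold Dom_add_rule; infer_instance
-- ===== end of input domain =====

-- B replaces A's index-driven boolean-marking loops by directly comparing the lists of (row[6],row[7])
-- key slices: list equality for ORD, per-key count (multiset) equality for OCC — objective: simpler.
-- Python A mutates `rules` in place (append); B performs the same append; the equivalence proved here
-- is about the RETURN value.

-- ===== PORT A =====

-- total stand-in for row[i] on a String list; Pre_ guarantees every index actually read is in range
def pvGetA (row : List String) (i : Nat) : String := row.getD i ""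

-- the ORD loop `for i in range(0, len(pattern))` indexes pattern[i] and rule[0][i] in lockstep and sets
-- check[i]; ported as the lockstep structural walk producing the final `check` list (initial False
-- entries beyond the walk are kept for totality; under the guard both lists have equal length)
def pvOrdCheck : List (List String) → List (List String) → List Bool
  | row :: rows, line :: lines =>
      (pvGetA row 6 == pvGetA line 6 && pvGetA row 7 == pvGetA line 7) :: pvOrdCheck rows lines
  | rows, [] => rows.map (fun _ => false)
  | [], _ => []

-- the OCC inner `for line in rule[0]` loop with counter j: walks rule[0] and `used` in lockstep
-- (used[j] test / used[j] = True); `ci` is check[i], constant during the scan (the loop breaks when it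
-- sets it); returns (matched i.e. check[i] set, updated used)
def pvOccInner (row : List String) (ci : Bool) :
    List (List String) → List Bool → Bool × List Bool
  | line :: lines, u :: us =>
      if pvGetA row 6 == pvGetA line 6 && pvGetA row 7 == pvGetA line 7 && !u && !ci then
        (true, true :: us)
      else
        let r := pvOccInner row ci lines us
        (r.1, u :: r.2)
  | _, us => (false, us)

-- the OCC outer `for row in pattern` loop with counter i: walks pattern and `check` in lockstep,
-- threading `used`; returns the final check list
def pvOccCheck : List (List String) → List (List String) → List Bool → List Bool → List Bool
  | row :: rows, lines, used, c :: cs =>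
      let r := pvOccInner row c lines used
      (if r.1 then true else c) :: pvOccCheck rows lines r.2 cs
  | _, _, _, check => check

-- the `for rule in rules` loop computing `found` (break = return true)
def pvFindA (pattern : List (List String)) (pattern_type rule_type : String) :
    List (List (List String) × Int × String × String) → Bool
  | [] => false
  | rule :: rest =>
    let used := rule.1.map (fun _ => false)
    let check0 := pattern.map (fun _ => false)
    if rule_type == "ORD" && rule.2.2.2 == "ORD" then
      if pattern_type == rule.2.2.1 && pattern.length == rule.1.length then
        let check := pvOrdCheck pattern rule.1
        let check_counter := check.countP (fun item => item)
        if check_counter == pattern.length then true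
        else pvFindA pattern pattern_type rule_type rest
      else pvFindA pattern pattern_type rule_type rest
    else if rule_type == "OCC" && rule.2.2.2 == "OCC" then
      if pattern_type == rule.2.2.1 && pattern.length == rule.1.length then
        let check := pvOccCheck pattern rule.1 used check0
        let check_counter := check.countP (fun item => item)
        if check_counter == pattern.length then true
        else pvFindA pattern pattern_type rule_type rest
      else pvFindA pattern pattern_type rule_type rest
    else pvFindA pattern pattern_type rule_type rest

def add_rule (rules : List (List (List String) × Int × String × String)) (pattern : List (List String)) (counter : Int) (pattern_type : String) (rule_type : String) : List (List (List String) × Int × String × String) :=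
  if rules.length == 0 then
    rules ++ [(pattern, counter, pattern_type, rule_type)]
  else
    let found := pvFindA pattern pattern_type rule_type rules
    if !found then rules ++ [(pattern, counter, pattern_type, rule_type)]
    else rules

-- ===== PORT B =====

-- tuple(row[6:8])
def pvKeyB (row : List String) : List String := PySem.List.slice row (some 6) (some 8)

-- the per-rule test of B's loop body (continue ⇒ false, found+break ⇒ true);
-- pkeys.length = len(pattern) since pkeys = [tuple(row[6:8]) for row in pattern]
def pvMatchB (pkeys : List (List String)) (pattern_type rule_type : String)
    (rule : List (List String) × Int × String × String) : Bool :=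
  if rule.2.2.2 != rule_type || rule.2.2.1 != pattern_type || rule.1.length != pkeys.length then
    false
  else
    let rkeys := rule.1.map pvKeyB
    if rule_type == "ORD" then pkeys == rkeys
    else if rule_type == "OCC" then pkeys.all (fun k => pkeys.count k == rkeys.count k)
    else false

def add_rule_alt (rules : List (List (List String) × Int × String × String)) (pattern : List (List String)) (counter : Int) (pattern_type : String) (rule_type : String) : List (List (List String) × Int × String × String) :=
  let pkeys := pattern.map pvKeyB
  let found := rules.any (pvMatchB pkeys pattern_type rule_type)
  if !found then rules ++ [(pattern, counter, pattern_type, rule_type)]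
  else rules

-- ===== PRECONDITION & SPEC =====
-- Pre_ excludes the inputs on which some rule passes A's type/pattern-type/length guards while a
-- pattern row or that rule's line is shorter than 8: there A's indexing at positions 6 and 7 can raise
-- IndexError (on the few such inputs where comparison short-circuiting lets A return, B returns the
-- same value; see the cite in the claim).
def Pre_add_rule (rules : List (List (List String) × Int × String × String)) (pattern : List (List String)) (counter : Int) (pattern_type : String) (rule_type : String) : Prop :=
  ∀ r ∈ rules,
    ((rule_type = "ORD" ∨ rule_type = "OCC") ∧ r.2.2.2 = rule_type ∧ r.2.2.1 = pattern_type ∧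
      r.1.length = pattern.length) →
    ((∀ row ∈ pattern, 8 ≤ row.length) ∧ (∀ line ∈ r.1, 8 ≤ line.length))

instance (rules : List (List (List String) × Int × String × String)) (pattern : List (List String)) (counter : Int) (pattern_type : String) (rule_type : String) : Decidable (Pre_add_rule rules pattern counter pattern_type rule_type) := by unfold Pre_add_rule; infer_instance

def pvWitness_add_rule : (List (List (List String) × Int × String × String)) × List (List String) × Int × String × String :=
  ([([["a","b","c","d","e","f","g","h"]], 1, "T", "ORD")],
   [["a","b","c","d","e","f","g","h"]], 2, "T", "ORD")

def Spec_add_rule (rules : List (List (List String) × Int × String × String)) (pattern : List (List String)) (counter : Int) (pattern_type : String) (rule_type : String) (out : List (List (List String) × Int × String × String)) : Prop := out = add_rule_alt rules pattern counter pattern_type rule_type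
instance (rules : List (List (List String) × Int × String × String)) (pattern : List (List String)) (counter : Int) (pattern_type : String) (rule_type : String) (out : List (List (List String) × Int × String × String)) : Decidable (Spec_add_rule rules pattern counter pattern_type rule_type out) := by unfold Spec_add_rule; infer_instance

-- ===== CLAIM (what is proved, stated in full; the proofs are below) =====
def Claim_equal_add_rule : Prop := ∀ (rules : List (List (List String) × Int × String × String)) (pattern : List (List String)) (counter : Int) (pattern_type : String) (rule_type : String), Dom_add_rule rules pattern counter pattern_type rule_type → Pre_add_rule rules pattern counter pattern_type rule_type → Spec_add_rule rules pattern counter pattern_type rule_type (add_rule rules pattern counter pattern_type rule_type)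

-- ===== LEMMAS AND PROOFS =====

-- proof-side abstractions
def pvKey (row : List String) : String × String := (pvGetA row 6, pvGetA row 7)

-- keys of the not-yet-used lines, in order
def pvRem : List (List String) → List Bool → List (String × String)
  | line :: lines, u :: us => if u then pvRem lines us else pvKey line :: pvRem lines us
  | _, _ => []

-- abstract greedy matcher: number of keys matched against a shrinking pool
def pvGreedy : List (String × String) → List (String × String) → Nat
  | [], _ => 0
  | k :: ks, rem => if k ∈ rem then pvGreedy ks (rem.erase k) + 1 else pvGreedy ks rem

-- the per-rule body of A's loop, named (pvFindA unfolds to this)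
def pvMatchA (pattern : List (List String)) (pattern_type rule_type : String)
    (rule : List (List String) × Int × String × String) : Bool :=
  if rule_type == "ORD" && rule.2.2.2 == "ORD" then
    (pattern_type == rule.2.2.1 && pattern.length == rule.1.length) &&
      ((pvOrdCheck pattern rule.1).countP (fun item => item) == pattern.length)
  else if rule_type == "OCC" && rule.2.2.2 == "OCC" then
    (pattern_type == rule.2.2.1 && pattern.length == rule.1.length) &&
      ((pvOccCheck pattern rule.1 (rule.1.map (fun _ => false)) (pattern.map (fun _ => false))).countP
          (fun item => item) == pattern.length)
  else false

theorem pvFindA_cons (pattern : List (List String)) (pt rt : String)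
    (rule : List (List String) × Int × String × String)
    (rest : List (List (List String) × Int × String × String)) :
    pvFindA pattern pt rt (rule :: rest) =
      (pvMatchA pattern pt rt rule || pvFindA pattern pt rt rest) := by
  simp only [pvFindA, pvMatchA]
  split_ifs <;> simp_all
theorem pvKeyB_eq (row : List String) (h : 8 ≤ row.length) :
    pvKeyB row = [pvGetA row 6, pvGetA row 7] := by
  have h6 : (6 : Int) = ((6 : Nat) : Int) := by norm_num
  have h8 : (8 : Int) = ((8 : Nat) : Int) := by norm_num
  rw [pvKeyB, h6, h8, PySem.List.slice_natCast]
  apply List.ext_getElem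
  · simp; omega
  · intro i h1 h2
    simp only [List.getElem_take, List.getElem_drop]
    simp only [List.length_take, List.length_drop, lt_min_iff] at h1
    have hi : i = 0 ∨ i = 1 := by omega
    rcases hi with rfl | rfl
    · have h' : (6 : Nat) < row.length := by omega
      simp [pvGetA, List.getD_eq_getElem?_getD, List.getElem?_eq_getElem h']
    · have h' : (7 : Nat) < row.length := by omega
      simp [pvGetA, List.getD_eq_getElem?_getD, List.getElem?_eq_getElem h']

def pvE (k : String × String) : List String := [k.1, k.2]

theorem pvE_inj : Function.Injective pvE := by
  intro ⟨a, b⟩ ⟨c, d⟩ h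
  simp [pvE] at h
  simp [h.1, h.2]

theorem pvMapKeyB (rows : List (List String)) (h : ∀ row ∈ rows, 8 ≤ row.length) :
    rows.map pvKeyB = (rows.map pvKey).map pvE := by
  rw [List.map_map]
  apply List.map_congr_left
  intro row hrow
  rw [Function.comp_apply, pvKeyB_eq row (h row hrow)]
  rfl
theorem pvOrdCheck_length (rows : List (List String)) : ∀ lines,
    (pvOrdCheck rows lines).length = rows.length := by
  induction rows with
  | nil => intro lines; cases lines <;> simp [pvOrdCheck]
  | cons r rs ih => intro lines; cases lines <;> simp [pvOrdCheck, ih]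

theorem pvOrdCheck_count (rows lines : List (List String)) (hlen : rows.length = lines.length) :
    ((pvOrdCheck rows lines).countP (fun item => item) = rows.length) ↔
      rows.map pvKey = lines.map pvKey := by
  induction rows generalizing lines with
  | nil => cases lines <;> simp_all [pvOrdCheck]
  | cons row rows ih =>
    cases lines with
    | nil => simp at hlen
    | cons line lines =>
      simp only [List.length_cons] at hlen
      have hle := List.countP_le_length (l := pvOrdCheck rows lines) (p := fun item => item)
      have hlen2 := pvOrdCheck_length rows lines
      rw [show pvOrdCheck (row :: rows) (line :: lines) =
        (pvGetA row 6 == pvGetA line 6 && pvGetA row 7 == pvGetA line 7) :: pvOrdCheck rows lines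
        from rfl]
      rw [List.countP_cons]
      simp only [List.map_cons, List.cons.injEq, List.length_cons]
      have hkey : (pvGetA row 6 == pvGetA line 6 && pvGetA row 7 == pvGetA line 7) = true ↔
          pvKey row = pvKey line := by
        simp [pvKey, Prod.ext_iff]
      by_cases hk : (pvGetA row 6 == pvGetA line 6 && pvGetA row 7 == pvGetA line 7) = true
      · rw [hk]
        simp only [if_true]
        constructor
        · intro hc
          exact ⟨hkey.mp hk, (ih lines (by omega)).mp (by omega)⟩
        · rintro ⟨-, hrest⟩
          have := (ih lines (by omega)).mpr hrest
          omega
      · rw [Bool.not_eq_true] at hk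
        rw [hk]
        simp only [Bool.false_eq_true, if_false]
        constructor
        · intro hc; omega
        · rintro ⟨hkeq, -⟩
          exact absurd (hkey.mpr hkeq) (by simp [hk])
theorem pvRem_false (lines : List (List String)) :
    pvRem lines (lines.map (fun _ => false)) = lines.map pvKey := by
  induction lines with
  | nil => rfl
  | cons l ls ih =>
    rw [List.map_cons,
      show pvRem (l :: ls) (false :: List.map (fun _ => false) ls)
        = pvKey l :: pvRem ls (List.map (fun _ => false) ls) from rfl,
      ih, List.map_cons]

theorem pvOccInner_spec (row : List String) (lines : List (List String)) (used : List Bool)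
    (h : used.length = lines.length) :
    (pvOccInner row false lines used).1 = decide (pvKey row ∈ pvRem lines used) ∧
    pvRem lines (pvOccInner row false lines used).2 =
      (if pvKey row ∈ pvRem lines used then (pvRem lines used).erase (pvKey row)
       else pvRem lines used) ∧
    (pvOccInner row false lines used).2.length = used.length := by
  induction lines generalizing used with
  | nil =>
    have : used = [] := by cases used <;> simp_all
    subst this
    simp [pvOccInner, pvRem]
  | cons line lines ih =>
    cases used with
    | nil => simp at h
    | cons u us =>
      simp only [List.length_cons] at h
      have h' : us.length = lines.length := by omega
      cases u with
      | true =>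
        rw [show pvOccInner row false (line :: lines) (true :: us) =
          ((pvOccInner row false lines us).1, true :: (pvOccInner row false lines us).2) from by
            simp [pvOccInner]]
        obtain ⟨i1, i2, i3⟩ := ih us h'
        refine ⟨by simpa [pvRem] using i1, ?_, by simp [i3]⟩
        simpa [pvRem] using i2
      | false =>
        by_cases hk : pvKey row = pvKey line
        · have hcond : (pvGetA row 6 == pvGetA line 6 && (pvGetA row 7 == pvGetA line 7)) = true := by
            simp [pvKey, Prod.ext_iff] at hk
            simp [hk.1, hk.2]
          rw [show pvOccInner row false (line :: lines) (false :: us) = (true, true :: us) from by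
            simp [pvOccInner, hcond]]
          refine ⟨?_, ?_, by simp⟩
          · simp [pvRem, hk]
          · simp [pvRem, hk, List.erase_cons_head]
        · have hcond : (pvGetA row 6 == pvGetA line 6 && (pvGetA row 7 == pvGetA line 7)) = false := by
            simp only [pvKey, Prod.ext_iff] at hk ⊢
            by_contra hc
            simp at hc
            exact hk ⟨hc.1, hc.2⟩
          rw [show pvOccInner row false (line :: lines) (false :: us) =
            ((pvOccInner row false lines us).1, false :: (pvOccInner row false lines us).2) from by
              simp [pvOccInner, hcond]]
          obtain ⟨i1, i2, i3⟩ := ih us h'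
          have hne : pvKey line ≠ pvKey row := fun hh => hk hh.symm
          refine ⟨?_, ?_, by simp [i3]⟩
          · simpa [pvRem, hk] using i1
          · rw [show pvRem (line :: lines) (false :: (pvOccInner row false lines us).2)
              = pvKey line :: pvRem lines (pvOccInner row false lines us).2 from rfl,
              show pvRem (line :: lines) (false :: us) = pvKey line :: pvRem lines us from rfl,
              i2]
            by_cases hmem : pvKey row ∈ pvRem lines us
            · rw [if_pos hmem, if_pos (by simp [hmem])]
              rw [List.erase_cons_tail]
              simp [hne]
            · rw [if_neg hmem, if_neg (by simp [hmem, hk])]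
theorem pvOccCheck_spec (rows : List (List String)) (lines : List (List String)) (used : List Bool)
    (h : used.length = lines.length) :
    (pvOccCheck rows lines used (rows.map (fun _ => false))).countP (fun item => item) =
      pvGreedy (rows.map pvKey) (pvRem lines used) := by
  induction rows generalizing used with
  | nil => simp [pvOccCheck, pvGreedy]
  | cons row rows ih =>
    obtain ⟨i1, i2, i3⟩ := pvOccInner_spec row lines used h
    rw [List.map_cons,
      show pvOccCheck (row :: rows) lines used (false :: rows.map (fun _ => false)) =
        (if (pvOccInner row false lines used).1 then true else false)
          :: pvOccCheck rows lines (pvOccInner row false lines used).2 (rows.map (fun _ => false))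
        from rfl,
      List.countP_cons, ih (pvOccInner row false lines used).2 (by omega), i2,
      show List.map pvKey (row :: rows) = pvKey row :: List.map pvKey rows from rfl,
      show pvGreedy (pvKey row :: rows.map pvKey) (pvRem lines used) =
        if pvKey row ∈ pvRem lines used then
          pvGreedy (rows.map pvKey) ((pvRem lines used).erase (pvKey row)) + 1
        else pvGreedy (rows.map pvKey) (pvRem lines used) from rfl]
    by_cases hmem : pvKey row ∈ pvRem lines used
    · rw [if_pos hmem, if_pos hmem]
      rw [show (pvOccInner row false lines used).1 = true from by simp [i1, hmem]]
      simp
    · rw [if_neg hmem, if_neg hmem]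
      rw [show (pvOccInner row false lines used).1 = false from by simp [i1, hmem]]
      simp

theorem pvGreedy_le (ks : List (String × String)) : ∀ rem, pvGreedy ks rem ≤ ks.length := by
  induction ks with
  | nil => intro rem; simp [pvGreedy]
  | cons k ks ih =>
    intro rem
    rw [show pvGreedy (k :: ks) rem =
      if k ∈ rem then pvGreedy ks (rem.erase k) + 1 else pvGreedy ks rem from rfl]
    split_ifs with hmem
    · have := ih (rem.erase k); simp; omega
    · have := ih rem; simp; omega

theorem pv_cons_subperm {α : Type} [BEq α] [LawfulBEq α] {k : α} {ks rem : List α} (hk : k ∈ rem) :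
    List.Subperm (k :: ks) rem ↔ List.Subperm ks (rem.erase k) := by
  rw [List.subperm_ext_iff, List.subperm_ext_iff]
  constructor
  · intro hc a ha
    have := hc a (by simp [ha])
    rw [List.count_erase]
    rw [List.count_cons] at this
    by_cases hak : a = k
    · subst hak; simp at this ⊢; omega
    · simp [hak, beq_false_of_ne hak] at this ⊢
      omega
  · intro hc a ha
    rw [List.count_cons]
    by_cases hak : a = k
    · subst hak
      by_cases hks : a ∈ ks
      · have := hc a hks
        rw [List.count_erase_self] at this
        have hpos : 0 < rem.count a := List.count_pos_iff.mpr hk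
        simp; omega
      · have h0 : ks.count a = 0 := List.count_eq_zero_of_not_mem hks
        have hpos : 0 < rem.count a := List.count_pos_iff.mpr hk
        simp [h0]; omega
    · rcases List.mem_cons.mp ha with ha | ha
      · exact absurd ha hak
      · have := hc a ha
        rw [List.count_erase_of_ne hak] at this
        simp [Ne.symm hak]
        omega

theorem pvGreedy_eq_iff (ks : List (String × String)) : ∀ rem,
    (pvGreedy ks rem = ks.length) ↔ List.Subperm ks rem := by
  induction ks with
  | nil => intro rem; simp [pvGreedy, List.nil_subperm]
  | cons k ks ih =>
    intro rem
    rw [show pvGreedy (k :: ks) rem =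
      if k ∈ rem then pvGreedy ks (rem.erase k) + 1 else pvGreedy ks rem from rfl]
    by_cases hmem : k ∈ rem
    · rw [if_pos hmem, pv_cons_subperm hmem, ← ih (rem.erase k)]
      simp
    · rw [if_neg hmem]
      constructor
      · intro hc
        have := pvGreedy_le ks rem
        simp at hc
        omega
      · intro hs
        exact absurd (hs.subset (by simp)) hmem
theorem pv_subperm_iff_counts {α : Type} [BEq α] [LawfulBEq α] {l₁ l₂ : List α}
    (h : l₁.length = l₂.length) :
    List.Subperm l₁ l₂ ↔ ∀ a ∈ l₁, l₁.count a = l₂.count a := by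
  constructor
  · intro hs a ha
    exact (hs.perm_of_length_le (le_of_eq h.symm)).count_eq a
  · intro hc
    rw [List.subperm_ext_iff]
    intro a ha
    exact le_of_eq (hc a ha)

theorem pvOcc_eq (rows lines : List (List String)) (hlen : rows.length = lines.length)
    (hr : ∀ row ∈ rows, 8 ≤ row.length) (hl : ∀ line ∈ lines, 8 ≤ line.length) :
    ((pvOccCheck rows lines (lines.map (fun _ => false)) (rows.map (fun _ => false))).countP
        (fun item => item) == rows.length) =
      ((rows.map pvKeyB).all (fun k => (rows.map pvKeyB).count k == (lines.map pvKeyB).count k)) := by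
  rw [pvOccCheck_spec rows lines _ (by simp), pvRem_false]
  rw [pvMapKeyB rows hr, pvMapKeyB lines hl]
  rw [Bool.eq_iff_iff]
  rw [beq_iff_eq, List.all_eq_true]
  have hlen' : (rows.map pvKey).length = (lines.map pvKey).length := by simp [hlen]
  rw [show rows.length = (rows.map pvKey).length by simp]
  rw [pvGreedy_eq_iff (rows.map pvKey) (lines.map pvKey),
    pv_subperm_iff_counts hlen']
  constructor
  · intro hc k hk
    rw [List.mem_map] at hk
    obtain ⟨a, ha, rfl⟩ := hk
    rw [List.count_map_of_injective _ _ pvE_inj, List.count_map_of_injective _ _ pvE_inj]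
    simp [hc a ha]
  · intro hc a ha
    have := hc (pvE a) (List.mem_map.mpr ⟨a, ha, rfl⟩)
    rw [List.count_map_of_injective _ _ pvE_inj, List.count_map_of_injective _ _ pvE_inj] at this
    simpa using this
theorem pvMatch_eq (pattern : List (List String)) (pt rt : String)
    (r : List (List String) × Int × String × String)
    (hpre : ((rt = "ORD" ∨ rt = "OCC") ∧ r.2.2.2 = rt ∧ r.2.2.1 = pt ∧
        r.1.length = pattern.length) →
      ((∀ row ∈ pattern, 8 ≤ row.length) ∧ (∀ line ∈ r.1, 8 ≤ line.length))) :
    pvMatchA pattern pt rt r = pvMatchB (pattern.map pvKeyB) pt rt r := by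
  unfold pvMatchA pvMatchB
  by_cases hOrd : rt = "ORD"
  · subst hOrd
    by_cases h3 : r.2.2.2 = "ORD"
    · by_cases hpt : r.2.2.1 = pt
      · by_cases hlen : r.1.length = pattern.length
        · obtain ⟨hr, hl⟩ := hpre ⟨Or.inl rfl, h3, hpt, hlen⟩
          simp only [h3, hpt, hlen, beq_self_eq_true, Bool.and_true, Bool.true_and,
            bne_self_eq_false, Bool.false_or, Bool.or_false, List.length_map, if_true,
            not_true_eq_false, decide_true]
          rw [if_neg (by simp), Bool.eq_iff_iff, beq_iff_eq]
          rw [pvOrdCheck_count pattern r.1 hlen.symm]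
          rw [pvMapKeyB pattern hr, pvMapKeyB r.1 hl, beq_iff_eq]
          constructor
          · intro h; rw [h]
          · intro h; exact (List.map_injective_iff.mpr pvE_inj) h
        · have hlen' : pattern.length ≠ r.1.length := fun h => hlen h.symm
          simp [h3, hpt, hlen, hlen']
      · have hpt' : pt ≠ r.2.2.1 := fun h => hpt h.symm
        simp [h3, hpt, hpt']
    · simp [h3]
  · by_cases hOcc : rt = "OCC"
    · subst hOcc
      by_cases h3 : r.2.2.2 = "OCC"
      · by_cases hpt : r.2.2.1 = pt
        · by_cases hlen : r.1.length = pattern.length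
          · obtain ⟨hr, hl⟩ := hpre ⟨Or.inr rfl, h3, hpt, hlen⟩
            simp only [h3, hpt, hlen, beq_self_eq_true, Bool.and_true, Bool.true_and,
              bne_self_eq_false, Bool.false_or, Bool.or_false, List.length_map, if_true,
              not_true_eq_false, decide_true]
            rw [if_neg (by decide)]
            exact pvOcc_eq pattern r.1 hlen.symm hr hl
          · have hlen' : pattern.length ≠ r.1.length := fun h => hlen h.symm
            simp [h3, hpt, hlen, hlen']
        · have hpt' : pt ≠ r.2.2.1 := fun h => hpt h.symm
          simp [h3, hpt, hpt']
      · simp [h3]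
    · have hOrd' : ¬ (rt == "ORD") = true := by simp [hOrd]
      have hOcc' : ¬ (rt == "OCC") = true := by simp [hOcc]
      by_cases h3 : r.2.2.2 = rt
      · simp [hOrd, hOcc, h3]
      · simp [hOrd, hOcc, h3]
theorem pvFind_eq (pattern : List (List String)) (pt rt : String)
    (rules : List (List (List String) × Int × String × String))
    (hpre : Pre_add_rule rules pattern 0 pt rt) :
    pvFindA pattern pt rt rules = rules.any (pvMatchB (pattern.map pvKeyB) pt rt) := by
  induction rules with
  | nil => rfl
  | cons r rest ih =>
    rw [pvFindA_cons, List.any_cons,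
      pvMatch_eq pattern pt rt r (hpre r (by simp)),
      ih (fun x hx => hpre x (by simp [hx]))]

-- ===== VERDICT (by name: the statement is the Claim_ definition above) =====
theorem add_rule_spec : Claim_equal_add_rule := by
  unfold Claim_equal_add_rule
  intro rules pattern counter pt rt hDom hPre
  unfold Spec_add_rule add_rule add_rule_alt
  cases rules with
  | nil => simp
  | cons r rest =>
    rw [if_neg (by simp)]
    rw [pvFind_eq pattern pt rt (r :: rest) hPre]
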